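-- pv_equiv track=rewrite | github.com/amstocker/aoc2018 | day2.py | count
-- ===== SOURCE A (Python) =====
-- def count(word):
--     d = {}
--     for c in word:
--         if c in d:
--             d[c] += 1
--         else:
--             d[c] = 1
--     two = 0
--     three = 0
--     for c in word:
--         if d[c] == 2:
--             two = 1
--         if d[c] == 3:
--             three = 1
--     return (two, three)
-- ===== SOURCE B (Python) =====
-- def count(word):
--     # Sort the characters so equal letters form contiguous runs, then scan the
--     # runs recursively: a run of length 2 sets the "two" flag, length 3 the
--     # "three" flag.  No frequency table at all.
--     def go(s):
--         if not s:
--             return (0, 0)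
--         c = s[0]
--         k = 1
--         while k < len(s) and s[k] == c:
--             k += 1
--         two, three = go(s[k:])
--         return (1 if k == 2 else two, 1 if k == 3 else three)
--     return go(sorted(word))
-- ===== Notes on version B (the rewrite author's own statement) =====
-- stated objective: alternative
-- what changed: B sorts the characters and scans the contiguous runs of equal letters recursively, setting the flags from each run's length, instead of A's dict frequency table plus a second per-character scan.
import Mathlib
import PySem

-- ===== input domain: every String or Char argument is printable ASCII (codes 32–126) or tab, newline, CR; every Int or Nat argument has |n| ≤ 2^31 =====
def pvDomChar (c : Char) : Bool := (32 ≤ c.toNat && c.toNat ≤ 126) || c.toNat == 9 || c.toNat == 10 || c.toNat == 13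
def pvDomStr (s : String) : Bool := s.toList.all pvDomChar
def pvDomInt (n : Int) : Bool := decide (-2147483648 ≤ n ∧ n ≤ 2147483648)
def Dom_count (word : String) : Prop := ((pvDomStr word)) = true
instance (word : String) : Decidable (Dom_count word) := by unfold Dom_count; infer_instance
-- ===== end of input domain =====

-- B sorts the characters and scans the runs of equal letters instead of A's dict
-- frequency table plus second per-character scan; alternative algorithm, not faster.

-- ===== PORT A =====
-- A: counting dict built with an explicit contains-branch, then a second scan of
-- the word setting the two flags from the dict.
def countDictA (cs : List Char) : PySem.Dict Char Int :=
  cs.foldl (fun d c => if d.contains c then d.insert c (d.getD c 0 + 1) else d.insert c 1)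
    PySem.Dict.empty

def count (word : String) : Int × Int :=
  let d := countDictA word.toList
  -- second 'for c in word' loop: d[c] is present since c ∈ word, so getD is exact
  word.toList.foldl
    (fun (p : Int × Int) c =>
      ((if d.getD c 0 = 2 then 1 else p.1), (if d.getD c 0 = 3 then 1 else p.2)))
    (0, 0)

-- ===== PORT B =====
-- the inner 'while k < len(s) and s[k] == c: k += 1' over the suffix s[1:]
def runPrefix (c : Char) : List Char → Nat
  | [] => 0
  | x :: xs => if x == c then 1 + runPrefix c xs else 0

theorem runPrefix_le (c : Char) (l : List Char) : runPrefix c l ≤ l.length := by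
  induction l with
  | nil => simp [runPrefix]
  | cons x xs ih => simp only [runPrefix, List.length_cons]; split <;> omega

-- go(s): flags from the first run's length k, recursing on s[k:]
def goRuns : List Char → Int × Int
  | [] => (0, 0)
  | c :: rest =>
    let k := 1 + runPrefix c rest
    let p := goRuns ((c :: rest).drop k)
    ((if k == 2 then 1 else p.1), (if k == 3 then 1 else p.2))
termination_by l => l.length
decreasing_by
  simp only [List.length_drop, List.length_cons]
  have := runPrefix_le c rest
  omega

def count_alt (word : String) : Int × Int :=
  goRuns (PySem.List.sorted word.toList (fun c => c.toNat) false)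

-- ===== PRECONDITION & SPEC =====
def Spec_count (word : String) (out : Int × Int) : Prop := out = count_alt word
instance (word : String) (out : Int × Int) : Decidable (Spec_count word out) := by unfold Spec_count; infer_instance

-- ===== CLAIM (what is proved, stated in full; the proofs are below) =====
def Claim_equal_count : Prop := ∀ (word : String), Dom_count word → Spec_count word (count word)

-- ===== LEMMAS AND PROOFS =====

-- A's branching counting update coincides pointwise with the branch-free one
theorem countDictA_eq_counter (cs : List Char) : countDictA cs = PySem.Dict.counter cs := by
  rw [← PySem.Dict.foldl_insert_getD_add_one_eq_counter]
  unfold countDictA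
  have hf : (fun (d : PySem.Dict Char Int) c =>
      if d.contains c then d.insert c (d.getD c 0 + 1) else d.insert c 1)
      = fun (d : PySem.Dict Char Int) c => d.insert c (d.getD c 0 + 1) := by
    funext d c
    by_cases h : d.contains c = true
    · simp [h]
    · have h' : d.contains c = false := by simpa using h
      rw [if_neg (by simpa using h), PySem.Dict.getD_of_not_contains d 0 h']
      norm_num
  rw [hf]

-- A's flag loop computes "some character of cs has count 2 (resp. 3)"
theorem flag_loop (m : Char → Int) (cs : List Char) (a b : Int) :
    cs.foldl (fun (p : Int × Int) c =>
        ((if m c = 2 then 1 else p.1), (if m c = 3 then 1 else p.2))) (a, b)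
      = ((if cs.any (fun c => m c == 2) then 1 else a),
         (if cs.any (fun c => m c == 3) then 1 else b)) := by
  induction cs generalizing a b with
  | nil => simp
  | cons c cs ih =>
      rw [List.foldl_cons, ih]
      simp only [List.any_cons, Bool.or_eq_true, beq_iff_eq, Prod.mk.injEq]
      constructor <;> split_ifs <;> tauto

-- in a sorted list whose elements all dominate c, the leading run of c is all of c
theorem split_run (c : Char) (l : List Char)
    (hle : ∀ x ∈ l, c.toNat ≤ x.toNat)
    (hp : l.Pairwise (fun a b => a.toNat ≤ b.toNat)) :
    l = List.replicate (runPrefix c l) c ++ l.drop (runPrefix c l)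
      ∧ c ∉ l.drop (runPrefix c l) := by
  induction l with
  | nil => simp [runPrefix]
  | cons x xs ih =>
      rcases List.pairwise_cons.mp hp with ⟨hx, hxs⟩
      by_cases hxc : x = c
      · subst hxc
        obtain ⟨h1, h2⟩ := ih hx hxs
        simp only [runPrefix, if_pos (beq_self_eq_true x)]
        constructor
        · calc x :: xs = x :: (List.replicate (runPrefix x xs) x ++ xs.drop (runPrefix x xs)) := by
                rw [← h1]
               _ = _ := by
                simp [List.replicate_succ, Nat.add_comm 1 (runPrefix x xs)]
        · simpa [Nat.add_comm 1 (runPrefix x xs), List.drop_succ_cons] using h2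
      · have hbe : (x == c) = false := by simp [hxc]
        simp only [runPrefix, hbe]
        refine ⟨by simp, ?_⟩
        have hcx : c.toNat < x.toNat := by
          have h1 := hle x (by simp)
          rcases Nat.lt_or_ge c.toNat x.toNat with h | h
          · exact h
          · have heq : c.toNat = x.toNat := by omega
            have : c = x := by rw [← Char.ofNat_toNat (c := c), heq, Char.ofNat_toNat]
            exact absurd this (fun he => hxc he.symm)
        intro hmem
        rcases List.mem_cons.mp hmem with he | hmem'
        · exact hxc he.symm
        · have := hx c hmem'
          omega

theorem if_one_or (a b : Bool) :
    (if a = true then (1 : Int) else if b = true then 1 else 0)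
      = (if (a || b) = true then 1 else 0) := by
  cases a <;> cases b <;> simp

-- goRuns on a sorted list computes the "some count equals 2/3" flags
theorem goRuns_flags : ∀ (n : Nat) (l : List Char), l.length ≤ n →
    l.Pairwise (fun a b => a.toNat ≤ b.toNat) →
    goRuns l = ((if l.any (fun c => l.count c == 2) then (1 : Int) else 0),
                (if l.any (fun c => l.count c == 3) then (1 : Int) else 0)) := by
  intro n
  induction n with
  | zero =>
      intro l hl _
      have : l = [] := List.length_eq_zero_iff.mp (Nat.le_zero.mp hl)
      subst this; simp [goRuns]
  | succ n ih =>
      intro l hl hp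
      match l with
      | [] => simp [goRuns]
      | c :: rest =>
        have hle : ∀ x ∈ c :: rest, c.toNat ≤ x.toNat := by
          intro x hx
          rcases List.mem_cons.mp hx with he | hm
          · subst he; exact le_refl _
          · exact (List.pairwise_cons.mp hp).1 x hm
        obtain ⟨hsplit, hnot⟩ := split_run c (c :: rest) hle hp
        set k : Nat := runPrefix c (c :: rest) with hk
        have hk1 : k = 1 + runPrefix c rest := by
          simp [hk, runPrefix]
        set rest' : List Char := (c :: rest).drop k with hrest'
        have hlen' : rest'.length ≤ n := by
          have h1 : rest'.length = (c :: rest).length - k := by simp [hrest']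
          simp only [List.length_cons] at hl h1 ⊢
          omega
        have hp' : rest'.Pairwise (fun a b => a.toNat ≤ b.toNat) :=
          hp.sublist (List.drop_sublist k _)
        have hcount_c : (c :: rest).count c = k := by
          conv_lhs => rw [hsplit]
          rw [List.count_append]
          simp [List.count_eq_zero_of_not_mem hnot]
        have hcount_ne : ∀ x, x ≠ c → (c :: rest).count x = rest'.count x := by
          intro x hx
          conv_lhs => rw [hsplit]
          rw [List.count_append, List.count_replicate, if_neg (fun h => hx (beq_iff_eq.mp h).symm)]
          simp
        have hflag : ∀ (m : Nat),
            ((c :: rest).any (fun x => (c :: rest).count x == m))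
              = ((k == m) || rest'.any (fun x => rest'.count x == m)) := by
          intro m
          apply Bool.eq_iff_iff.mpr
          simp only [List.any_eq_true, beq_iff_eq, Bool.or_eq_true]
          constructor
          · rintro ⟨x, hxm, hxc⟩
            by_cases hxeq : x = c
            · subst hxeq
              rw [hcount_c] at hxc
              exact Or.inl hxc
            · refine Or.inr ⟨x, ?_, by rw [← hcount_ne x hxeq]; exact hxc⟩
              have hm2 : x ∈ List.replicate k c ++ rest' := by rw [← hsplit]; exact hxm
              rcases List.mem_append.mp hm2 with h | h
              · exact absurd (List.eq_of_mem_replicate h) hxeq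
              · exact h
          · rintro (hkm | ⟨x, hxm, hxc⟩)
            · exact ⟨c, by simp, by rw [hcount_c]; exact hkm⟩
            · have hxeq : x ≠ c := fun he => hnot (he ▸ hxm)
              refine ⟨x, ?_, by rw [hcount_ne x hxeq]; exact hxc⟩
              have hm2 : x ∈ List.replicate k c ++ rest' := List.mem_append.mpr (Or.inr hxm)
              rw [← hsplit] at hm2; exact hm2
        rw [goRuns]
        simp only [← hk1, ← hrest']
        rw [ih rest' hlen' hp']
        rw [hflag 2, hflag 3]
        exact Prod.ext (if_one_or _ _) (if_one_or _ _)

-- ===== VERDICT (by name: the statement is the Claim_ definition above) =====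
theorem count_spec : Claim_equal_count := by
  intro word _
  show count word = count_alt word
  unfold count count_alt
  rw [countDictA_eq_counter]
  simp only [PySem.Dict.getD_counter]
  rw [flag_loop]
  set l := word.toList
  set s := PySem.List.sorted l (fun c => c.toNat) false with hs
  have hperm : s.Perm l := PySem.List.sorted_perm l _ _
  have hp : s.Pairwise (fun a b => a.toNat ≤ b.toNat) := PySem.List.sorted_pairwise l _
  rw [goRuns_flags s.length s (le_refl _) hp]
  have hany : ∀ (m : Nat),
      (l.any (fun c => ((l.count c : Int)) == (m : Int))) = (s.any (fun c => s.count c == m)) := by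
    intro m
    apply Bool.eq_iff_iff.mpr
    simp only [List.any_eq_true, beq_iff_eq]
    constructor
    · rintro ⟨c, hc, hcc⟩
      exact ⟨c, hperm.mem_iff.mpr hc, by rw [hperm.count_eq]; exact_mod_cast hcc⟩
    · rintro ⟨c, hc, hcc⟩
      exact ⟨c, hperm.mem_iff.mp hc, by rw [← hperm.count_eq]; exact_mod_cast hcc⟩
  have h2 := hany 2
  have h3 := hany 3
  norm_num at h2 h3
  rw [h2, h3]
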